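-- pv_equiv track=rewrite | github.com/dhaneshragu/8-Puzzle-Solver | 8PuzzleSolver.py | reversals
-- ===== SOURCE A (Python) =====
-- def reversals(board):
--     '''Function to return the number of tiles inverted in the initial state wrt standard goal configuration'''
--     rev=0
--     for i in range(0, 9): # Counting the number of reversals in the matrix
--         if board[i] != 0:
--             for j in range(i + 1, 9):
--                 if board[j] != 0 and board[i] > board[j]:
--                     rev += 1 # Incase the numbers are reversed for eg: 2 1 instead of 1 2, then count those cases
--     return rev # Returning the inversion/reversal count
-- ===== SOURCE B (Python) =====
-- def _inversions(tiles):
--     if not tiles: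
--         return 0
--     x, rest = tiles[0], tiles[1:]
--     count = 0
--     for y in rest:
--         if y < x:
--             count += 1
--     return count + _inversions(rest)
--
-- def reversals(board):
--     '''Number of inversions among the non-zero tiles of the 9-cell board.'''
--     tiles = []
--     for i in range(9):
--         if board[i] != 0:
--             tiles.append(board[i])
--     return _inversions(tiles)
-- ===== Notes on version B (the rewrite author's own statement) =====
-- stated objective: simpler
-- what changed: B strips the blank (zero) tiles from the first 9 entries in one pass and then counts inversions of the filtered list by structural recursion (head vs rest), instead of A's index-based double loop with zero guards inside both loops; Pre_ excludes boards shorter than 9, on which A raises IndexError.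
import Mathlib
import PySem

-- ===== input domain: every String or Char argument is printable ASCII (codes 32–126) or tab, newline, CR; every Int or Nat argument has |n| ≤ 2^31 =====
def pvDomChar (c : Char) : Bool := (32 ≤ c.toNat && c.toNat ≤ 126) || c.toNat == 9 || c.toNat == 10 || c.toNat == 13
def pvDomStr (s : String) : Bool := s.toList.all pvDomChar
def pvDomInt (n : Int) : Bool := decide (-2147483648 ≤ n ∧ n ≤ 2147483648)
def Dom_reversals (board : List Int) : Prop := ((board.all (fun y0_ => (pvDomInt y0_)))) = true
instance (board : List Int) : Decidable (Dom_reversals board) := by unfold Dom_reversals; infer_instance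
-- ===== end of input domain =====

-- B strips the zero tiles from the first 9 entries, then counts inversions by structural
-- recursion on the filtered list — simpler than A's index double loop with inline zero guards.


-- ===== PORT A =====
-- Literal port of A: for i in range(0,9) with board[i] (pyGet?); on an out-of-range index
-- Python raises IndexError, here the accumulator is returned unchanged (excluded by Pre_).
def reversals (board : List Int) : Int :=
  (PySem.List.pyRange 0 9 1).foldl (fun rev i =>
    match PySem.List.pyGet? board i with
    | none => rev
    | some bi =>
      if bi ≠ 0 then
        (PySem.List.pyRange (i + 1) 9 1).foldl (fun rev j =>
          match PySem.List.pyGet? board j with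
          | none => rev
          | some bj => if bj ≠ 0 ∧ bi > bj then rev + 1 else rev) rev
      else rev) 0

-- ===== PORT B =====
-- helper _inversions: head-vs-rest structural recursion
def pvInversions : List Int → Int
  | [] => 0
  | x :: rest => rest.foldl (fun count y => if y < x then count + 1 else count) 0 + pvInversions rest

def reversals_alt (board : List Int) : Int :=
  pvInversions ((PySem.List.pyRange 0 9 1).foldl (fun tiles i =>
    match PySem.List.pyGet? board i with
    | none => tiles
    | some b => if b ≠ 0 then tiles ++ [b] else tiles) [])

-- ===== PRECONDITION & SPEC =====
-- Pre_ excludes exactly the boards with fewer than 9 entries, on which A raises IndexError.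
def Pre_reversals (board : List Int) : Prop := 9 ≤ board.length
instance (board : List Int) : Decidable (Pre_reversals board) := by unfold Pre_reversals; infer_instance
def pvWitness_reversals : List Int := [1, 2, 3, 4, 5, 6, 7, 8, 0]

def Spec_reversals (board : List Int) (out : Int) : Prop := out = reversals_alt board
instance (board : List Int) (out : Int) : Decidable (Spec_reversals board out) := by unfold Spec_reversals; infer_instance

-- ===== CLAIM (what is proved, stated in full; the proofs are below) =====
def Claim_equal_reversals : Prop := ∀ (board : List Int), Dom_reversals board → Pre_reversals board → Spec_reversals board (reversals board)

-- ===== LEMMAS AND PROOFS =====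

-- A's shape on a list: outer pass with zero guard, inner count with zero guard.
def pvSumA : List Int → Int
  | [] => 0
  | x :: xs =>
      (if x ≠ 0 then xs.foldl (fun rev y => if y ≠ 0 ∧ x > y then rev + 1 else rev) 0 else 0)
      + pvSumA xs

theorem pv_inner_shift (x : Int) (l : List Int) (rev : Int) :
    l.foldl (fun r y => if y ≠ 0 ∧ x > y then r + 1 else r) rev
      = rev + l.foldl (fun r y => if y ≠ 0 ∧ x > y then r + 1 else r) 0 := by
  rw [PySem.List.foldl_ite_add_one, PySem.List.foldl_ite_add_one]
  omega

-- inner index loop over range(k,9) = element loop over l9.drop k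
theorem pv_inner_idx (L l9 : List Int) (hlen : l9.length = 9)
    (hget : ∀ j : Nat, j < 9 → PySem.List.pyGet? L (j : Int) = some (l9.getD j 0))
    (x : Int) : ∀ (k : Nat) (rev : Int), k ≤ 9 →
    (PySem.List.pyRange (k : Int) 9 1).foldl (fun rev j =>
        match PySem.List.pyGet? L j with
        | none => rev
        | some bj => if bj ≠ 0 ∧ x > bj then rev + 1 else rev) rev
      = (l9.drop k).foldl (fun rev y => if y ≠ 0 ∧ x > y then rev + 1 else rev) rev := by
  intro k rev hk
  induction h9 : 9 - k generalizing k rev with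
  | zero =>
      have hk9 : k = 9 := by omega
      subst hk9
      rw [PySem.List.pyRange_one_eq_nil (by norm_num), List.drop_eq_nil_of_le (by omega)]
      rfl
  | succ n ih =>
      have hk9 : k < 9 := by omega
      rw [PySem.List.pyRange_one_cons (by exact_mod_cast hk9)]
      simp only [List.foldl_cons]
      rw [hget k hk9, List.drop_eq_getElem_cons (by omega),
          List.getD_eq_getElem l9 0 (by omega)]
      dsimp only
      simp only [List.foldl_cons]
      have : ((k : Int) + 1) = ((k + 1 : Nat) : Int) := by push_cast; ring
      rw [this]
      exact ih (k + 1) _ (by omega) (by omega)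

-- outer index loop over range(k,9) = pvSumA of l9.drop k (plus the threaded accumulator)
theorem pv_outer_idx (L l9 : List Int) (hlen : l9.length = 9)
    (hget : ∀ j : Nat, j < 9 → PySem.List.pyGet? L (j : Int) = some (l9.getD j 0)) :
    ∀ (k : Nat) (rev : Int), k ≤ 9 →
    (PySem.List.pyRange (k : Int) 9 1).foldl (fun rev i =>
        match PySem.List.pyGet? L i with
        | none => rev
        | some bi =>
          if bi ≠ 0 then
            (PySem.List.pyRange (i + 1) 9 1).foldl (fun rev j =>
              match PySem.List.pyGet? L j with
              | none => rev
              | some bj => if bj ≠ 0 ∧ bi > bj then rev + 1 else rev) rev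
          else rev) rev
      = rev + pvSumA (l9.drop k) := by
  intro k rev hk
  induction h9 : 9 - k generalizing k rev with
  | zero =>
      have hk9 : k = 9 := by omega
      subst hk9
      rw [PySem.List.pyRange_one_eq_nil (by norm_num), List.drop_eq_nil_of_le (by omega)]
      simp [pvSumA]
  | succ n ih =>
      have hk9 : k < 9 := by omega
      rw [PySem.List.pyRange_one_cons (by exact_mod_cast hk9)]
      simp only [List.foldl_cons]
      rw [hget k hk9, List.drop_eq_getElem_cons (by omega),
          List.getD_eq_getElem l9 0 (by omega)]
      dsimp only
      have hcast : ((k : Int) + 1) = ((k + 1 : Nat) : Int) := by push_cast; ring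
      by_cases hz : l9[k] ≠ 0
      · rw [if_pos hz, hcast, pv_inner_idx L l9 hlen hget l9[k] (k + 1) rev (by omega),
            pv_inner_shift, ih (k + 1) _ (by omega) (by omega)]
        simp only [pvSumA, if_pos hz]
        omega
      · rw [if_neg hz, hcast, ih (k + 1) _ (by omega) (by omega)]
        simp only [pvSumA, if_neg hz]
        omega

-- B's tile-collecting index loop over range(k,9) = the filtered drop of l9
theorem pv_tiles_idx (L l9 : List Int) (hlen : l9.length = 9)
    (hget : ∀ j : Nat, j < 9 → PySem.List.pyGet? L (j : Int) = some (l9.getD j 0)) :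
    ∀ (k : Nat) (acc : List Int), k ≤ 9 →
    (PySem.List.pyRange (k : Int) 9 1).foldl (fun tiles i =>
        match PySem.List.pyGet? L i with
        | none => tiles
        | some b => if b ≠ 0 then tiles ++ [b] else tiles) acc
      = acc ++ (l9.drop k).filter (fun b => b != 0) := by
  intro k acc hk
  induction h9 : 9 - k generalizing k acc with
  | zero =>
      have hk9 : k = 9 := by omega
      subst hk9
      rw [PySem.List.pyRange_one_eq_nil (by norm_num), List.drop_eq_nil_of_le (by omega)]
      simp
  | succ n ih =>
      have hk9 : k < 9 := by omega
      rw [PySem.List.pyRange_one_cons (by exact_mod_cast hk9)]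
      simp only [List.foldl_cons]
      rw [hget k hk9, List.drop_eq_getElem_cons (by omega),
          List.getD_eq_getElem l9 0 (by omega)]
      dsimp only
      have hcast : ((k : Int) + 1) = ((k + 1 : Nat) : Int) := by push_cast; ring
      rw [List.filter_cons, hcast]
      by_cases hz : l9[k] ≠ 0
      · rw [if_pos hz, ih (k + 1) _ (by omega) (by omega),
            show (l9[k] != 0) = true by simp [hz]]
        simp
      · rw [if_neg hz, ih (k + 1) _ (by omega) (by omega),
            show (l9[k] != 0) = false by simpa using hz]
        simp

-- inner loop guard commutes with filtering (used for pvSumA vs pvInversions)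
theorem pv_inner_filter (x : Int) (xs : List Int) :
    xs.foldl (fun rev y => if y ≠ 0 ∧ x > y then rev + 1 else rev) (0 : Int)
      = (xs.filter (fun b => b != 0)).foldl (fun count y => if y < x then count + 1 else count) 0 := by
  rw [PySem.List.foldl_ite_add_one, PySem.List.foldl_ite_add_one, List.countP_filter]
  congr 1
  refine congrArg _ (List.countP_congr ?_)
  intro y _
  simp [and_comm]

-- outer pass: A's guarded sum equals the inversion count of the filtered list
theorem pv_sumA_eq_inv (l : List Int) :
    pvSumA l = pvInversions (l.filter (fun b => b != 0)) := by
  induction l with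
  | nil => rfl
  | cons x xs ih =>
      by_cases hx : x = 0
      · subst hx; simpa [pvSumA] using ih
      · simp only [pvSumA, List.filter_cons, show (x != 0) = true by simp [hx], if_true,
          pvInversions, ih, if_pos hx]
        rw [pv_inner_filter]

theorem pv_exists_nine (l : List Int) (h : 9 ≤ l.length) :
    ∃ a0 a1 a2 a3 a4 a5 a6 a7 a8 t,
      l = a0 :: a1 :: a2 :: a3 :: a4 :: a5 :: a6 :: a7 :: a8 :: t := by
  rcases l with _|⟨a0,_|⟨a1,_|⟨a2,_|⟨a3,_|⟨a4,_|⟨a5,_|⟨a6,_|⟨a7,_|⟨a8,t⟩⟩⟩⟩⟩⟩⟩⟩⟩ <;>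
    first
      | exact ⟨_, _, _, _, _, _, _, _, _, _, rfl⟩
      | simp_all

-- ===== VERDICT (by name: the statement is the Claim_ definition above) =====
theorem reversals_spec : Claim_equal_reversals := by
  intro board _ hpre
  obtain ⟨a0, a1, a2, a3, a4, a5, a6, a7, a8, t, rfl⟩ := pv_exists_nine board hpre
  show reversals _ = reversals_alt _
  have hget : ∀ j : Nat, j < 9 →
      PySem.List.pyGet? (a0::a1::a2::a3::a4::a5::a6::a7::a8::t) (j : Int)
        = some ([a0, a1, a2, a3, a4, a5, a6, a7, a8].getD j 0) := by
    intro j hj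
    rw [PySem.List.pyGet?_natCast]
    interval_cases j <;> rfl
  have h0 := pv_outer_idx (a0::a1::a2::a3::a4::a5::a6::a7::a8::t)
      [a0, a1, a2, a3, a4, a5, a6, a7, a8] rfl hget 0 0 (by omega)
  have h1 := pv_tiles_idx (a0::a1::a2::a3::a4::a5::a6::a7::a8::t)
      [a0, a1, a2, a3, a4, a5, a6, a7, a8] rfl hget 0 [] (by omega)
  simp only [Nat.cast_zero, List.drop_zero, List.nil_append] at h1
  rw [reversals_alt, h1, reversals, ← pv_sumA_eq_inv]
  simpa using h0
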